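-- pv_equiv track=rewrite | github.com/brb45/Desk_2 | proc_lt_std.py | deleteC
-- ===== SOURCE A (Python) =====
-- def deleteC(A):
--     lenA  = len(A)
--     lenS = len(A[0])
--
--     cnt = 0
--     for i in range(lenS):
--         for j in range(lenA-1):
--             if A[j][i] > A[j+1][i]:
--                 cnt += 1
--                 break
--             #continue
--     return cnt
-- ===== SOURCE B (Python) =====
-- def deleteC(A):
--     cols = [[row[i] for row in A] for i in range(len(A[0]))]
--     return sum(1 for col in cols if sorted(col) != col)
-- ===== Notes on version B (the rewrite author's own statement) =====
-- stated objective: alternative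
-- what changed: B transposes the matrix into explicit column lists and counts the columns that differ from their sorted version, replacing A's column-major scan of adjacent row pairs with break-and-count by a sort-and-compare sortedness test per column.
-- outside the precondition, e.g. on deleteC([[2], [1], []]): A returns 1, B raises IndexError
import Mathlib
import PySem

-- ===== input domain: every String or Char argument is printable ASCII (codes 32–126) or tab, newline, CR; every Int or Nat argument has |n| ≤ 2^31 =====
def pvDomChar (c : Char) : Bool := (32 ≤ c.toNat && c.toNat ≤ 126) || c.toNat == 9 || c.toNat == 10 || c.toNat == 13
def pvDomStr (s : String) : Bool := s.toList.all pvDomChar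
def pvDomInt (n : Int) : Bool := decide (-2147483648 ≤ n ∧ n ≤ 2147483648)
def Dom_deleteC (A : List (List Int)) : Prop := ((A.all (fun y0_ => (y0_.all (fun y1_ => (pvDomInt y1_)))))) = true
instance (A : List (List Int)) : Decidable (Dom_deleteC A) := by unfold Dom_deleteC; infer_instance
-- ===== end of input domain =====

-- B transposes the matrix into column lists and counts columns that differ from their sorted
-- version (sort-and-compare sortedness test), instead of A's adjacent-row-pair scan with a break.

-- ===== PORT A =====
-- inner 'for j in range(lenA-1): if A[j][i] > A[j+1][i]: cnt += 1; break' — the break is the 'true' early exit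
def deleteC_inner (A : List (List Int)) (i : Int) : List Int → Bool
  | [] => false
  | j :: js =>
      if PySem.List.pyGetD (PySem.List.pyGetD A j []) i 0 >
         PySem.List.pyGetD (PySem.List.pyGetD A (j+1) []) i 0 then true
      else deleteC_inner A i js

def deleteC (A : List (List Int)) : Int :=
  let lenA : Int := A.length
  let lenS : Int := (A.headD []).length
  (PySem.List.pyRange 0 lenS 1).foldl
    (fun cnt i => if deleteC_inner A i (PySem.List.pyRange 0 (lenA - 1) 1) then cnt + 1 else cnt) 0

-- ===== PORT B =====
def deleteC_alt (A : List (List Int)) : Int :=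
  let cols : List (List Int) :=
    (PySem.List.pyRange 0 ((A.headD []).length : Int) 1).map
      (fun i => A.map (fun row => PySem.List.pyGetD row i 0))
  cols.foldl (fun s col => if PySem.List.sorted col (fun x => x) false ≠ col then s + 1 else s) 0

-- ===== PRECONDITION & SPEC =====
-- Pre_ excludes the empty matrix (A[0] raises IndexError in both programs) and matrices with a
-- row shorter than the first row: there both programs normally raise IndexError, except that A's
-- early break can skip the short row and return, while B builds every full column and raises.
def Pre_deleteC (A : List (List Int)) : Prop :=
  A ≠ [] ∧ ∀ r ∈ A, (A.headD []).length ≤ r.length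
instance (A : List (List Int)) : Decidable (Pre_deleteC A) := by unfold Pre_deleteC; infer_instance

def pvWitness_deleteC : List (List Int) := [[1, 2], [2, 1]]

def Spec_deleteC (A : List (List Int)) (out : Int) : Prop := out = deleteC_alt A
instance (A : List (List Int)) (out : Int) : Decidable (Spec_deleteC A out) := by unfold Spec_deleteC; infer_instance

-- ===== CLAIM (what is proved, stated in full; the proofs are below) =====
def Claim_equal_deleteC : Prop := ∀ (A : List (List Int)), Dom_deleteC A → Pre_deleteC A → Spec_deleteC A (deleteC A)

-- ===== LEMMAS AND PROOFS =====

-- the Boolean "column i has a descending adjacent pair", phrased over the pair list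
def badCond (A : List (List Int)) (i : Int) : Bool :=
  (A.zip (A.tail)).any (fun p => decide (PySem.List.pyGetD p.1 i 0 > PySem.List.pyGetD p.2 i 0))

theorem inner_eq_any (A : List (List Int)) (i : Int) (l : List Int) :
    deleteC_inner A i l
      = l.any (fun j => decide (PySem.List.pyGetD (PySem.List.pyGetD A j []) i 0 >
                                PySem.List.pyGetD (PySem.List.pyGetD A (j+1) []) i 0)) := by
  induction l with
  | nil => rfl
  | cons x xs ih => by_cases h : (PySem.List.pyGetD (PySem.List.pyGetD A x []) i 0 >
      PySem.List.pyGetD (PySem.List.pyGetD A (x+1) []) i 0) <;> simp [deleteC_inner, ih, h]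

theorem zip_tail_getElem (A : List (List Int)) (k : Nat) (hk : k < (A.zip A.tail).length) :
    (A.zip A.tail)[k] = (A[k]'(by simp at hk; omega),
                         A[k+1]'(by simp [List.length_tail] at hk; omega)) := by
  have h1 : k < A.length := by simp at hk; omega
  have h2 : k < A.tail.length := by simp at hk; simpa [List.length_tail] using (by omega : k < A.length - 1)
  rw [List.getElem_zip]
  congr 1
  rw [List.getElem_tail]

theorem any_range_eq_badCond (A : List (List Int)) (i : Int) :
    ((PySem.List.pyRange 0 ((A.length : Int) - 1) 1).any
      (fun j => decide (PySem.List.pyGetD (PySem.List.pyGetD A j []) i 0 >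
                        PySem.List.pyGetD (PySem.List.pyGetD A (j+1) []) i 0)))
      = badCond A i := by
  cases hA : A with
  | nil => simp [badCond, PySem.List.pyRange_one_eq_nil]
  | cons a as =>
    rw [← hA]
    have hlen : 1 ≤ A.length := by rw [hA]; simp
    unfold badCond
    rw [Bool.eq_iff_iff]
    simp only [List.any_eq_true, decide_eq_true_eq]
    constructor
    · rintro ⟨j, hj, hcond⟩
      rw [PySem.List.mem_pyRange_one] at hj
      obtain ⟨hj0, hj1⟩ := hj
      set k := j.toNat with hk
      have hjk : j = (k : Int) := by omega
      have hkl : k < A.length - 1 := by omega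
      refine ⟨(A.zip A.tail)[k]'(by simp [List.length_tail]; omega), List.getElem_mem _, ?_⟩
      rw [zip_tail_getElem A k (by simp [List.length_tail]; omega)]
      simp only [hjk] at hcond
      rw [PySem.List.pyGetD_natCast] at hcond
      have : ((k : Int) + 1) = ((k + 1 : Nat) : Int) := by push_cast; ring
      rw [this, PySem.List.pyGetD_natCast] at hcond
      simpa [List.getD_eq_getElem?_getD, List.getElem?_eq_getElem (by omega : k < A.length),
             List.getElem?_eq_getElem (by omega : k + 1 < A.length)] using hcond
    · rintro ⟨p, hp, hcond⟩
      obtain ⟨k, hk, rfl⟩ := List.mem_iff_getElem.mp hp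
      have hk' : k < A.length - 1 := by simp [List.length_tail] at hk; omega
      refine ⟨(k : Int), ?_, ?_⟩
      · rw [PySem.List.mem_pyRange_one]; omega
      · rw [zip_tail_getElem A k hk] at hcond
        rw [PySem.List.pyGetD_natCast]
        have : ((k : Int) + 1) = ((k + 1 : Nat) : Int) := by push_cast; ring
        rw [this, PySem.List.pyGetD_natCast]
        simpa [List.getD_eq_getElem?_getD, List.getElem?_eq_getElem (by omega : k < A.length),
               List.getElem?_eq_getElem (by omega : k + 1 < A.length)] using hcond

-- A's value: countP of badCond over the column range
theorem deleteC_eq_countP (A : List (List Int)) :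
    deleteC A = ((PySem.List.pyRange 0 ((A.headD []).length : Int) 1).countP (badCond A) : Int) := by
  unfold deleteC
  simp only []
  have hfold : ∀ (l : List Int) (c : Int),
      l.foldl (fun cnt i => if deleteC_inner A i (PySem.List.pyRange 0 ((A.length : Int) - 1) 1) then cnt + 1 else cnt) c
        = c + (l.countP (badCond A) : Int) := by
    intro l
    induction l with
    | nil => intro c; simp
    | cons x xs ih =>
      intro c
      rw [List.foldl_cons, List.countP_cons, ih]
      rw [inner_eq_any, any_range_eq_badCond]
      by_cases h : badCond A x = true <;> simp [h] <;> omega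
  rw [hfold]; simp

-- adjacency via zip-with-tail coincides with IsChain
theorem isChain_iff_zip_tail {α : Type} (S : α → α → Prop) :
    ∀ l : List α, List.IsChain S l ↔ ∀ p ∈ l.zip l.tail, S p.1 p.2
  | [] => by simp
  | [a] => by simp
  | a :: b :: t => by
      rw [List.isChain_cons_cons, isChain_iff_zip_tail S (b :: t)]
      simp

-- sort-and-compare is exactly "no descending adjacent pair"
theorem sorted_eq_self_iff (l : List Int) :
    PySem.List.sorted l (fun x => x) false = l ↔ l.Pairwise (· ≤ ·) := by
  constructor
  · intro h
    have := PySem.List.sorted_pairwise (xs := l) (key := fun x : Int => x)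
    rwa [h] at this
  · intro h
    exact PySem.List.sorted_eq_self_of_pairwise l (fun x => x) h

theorem badCond_eq_sorted_ne (A : List (List Int)) (i : Int) :
    badCond A i = decide (PySem.List.sorted (A.map (fun row => PySem.List.pyGetD row i 0)) (fun x => x) false
                           ≠ A.map (fun row => PySem.List.pyGetD row i 0)) := by
  set f : List Int → Int := fun row => PySem.List.pyGetD row i 0 with hf
  rw [Bool.eq_iff_iff]
  simp only [decide_eq_true_eq, badCond, List.any_eq_true, decide_eq_true_eq]
  rw [Ne, sorted_eq_self_iff, ← List.isChain_iff_pairwise, List.isChain_map f,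
      isChain_iff_zip_tail (fun a b : List Int => f a ≤ f b) A]
  push_neg
  constructor
  · rintro ⟨p, hp, hc⟩; exact ⟨p, hp, by simpa [hf] using hc⟩
  · rintro ⟨p, hp, hc⟩; exact ⟨p, hp, by simpa [hf] using hc⟩

theorem deleteC_alt_eq_countP (A : List (List Int)) :
    deleteC_alt A = ((PySem.List.pyRange 0 ((A.headD []).length : Int) 1).countP (badCond A) : Int) := by
  unfold deleteC_alt
  simp only []
  set P : List Int → Bool := fun col => decide (PySem.List.sorted col (fun x => x) false ≠ col) with hP
  have hfold : ∀ (l : List (List Int)) (c : Int),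
      l.foldl (fun s col => if PySem.List.sorted col (fun x => x) false ≠ col then s + 1 else s) c
        = c + (l.countP P : Int) := by
    intro l
    induction l with
    | nil => intro c; simp
    | cons x xs ih =>
      intro c
      rw [List.foldl_cons, List.countP_cons, ih]
      by_cases h : PySem.List.sorted x (fun y => y) false ≠ x <;> simp [hP, h] <;> omega
  rw [hfold, List.countP_map, zero_add]
  congr 1
  apply List.countP_congr
  intro i _
  simp only [Function.comp, hP]
  rw [badCond_eq_sorted_ne]

-- ===== VERDICT (by name: the statement is the Claim_ definition above) =====
theorem deleteC_spec : Claim_equal_deleteC := by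
  intro A _ _
  unfold Spec_deleteC
  rw [deleteC_eq_countP, deleteC_alt_eq_countP]
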